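-- pv_equiv track=rewrite | github.com/liside163/essence_forge | core/models/lwpt.py | _normalize_kernel_sizes
-- ===== SOURCE A (Python) =====
-- from typing import Sequence, Tuple
--
-- def _normalize_kernel_sizes(num_bands: int, kernel_sizes: Sequence[int]) -> Tuple[int, ...]:
--     """
--     将 kernel 配置对齐到 `num_bands`。
--
--     规则：
--     - 如果输入长度小于 `num_bands`，循环补齐。
--     - 如果输入长度大于 `num_bands`，截断。
--     - 每个 kernel 必须是大于 1 的奇数，确保时序长度不变。
--     """
--
--     if num_bands <= 0:
--         raise ValueError("num_bands 必须 > 0")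
--     if len(kernel_sizes) == 0:
--         raise ValueError("kernel_sizes 不能为空")
--
--     raw = [int(k) for k in kernel_sizes]
--     for k in raw:
--         if k <= 1 or k % 2 == 0:
--             raise ValueError(f"kernel_size 必须是大于 1 的奇数，当前 {k}")
--
--     out: list[int] = []
--     idx = 0
--     while len(out) < num_bands:
--         out.append(raw[idx % len(raw)])
--         idx += 1
--     return tuple(out[:num_bands])
-- ===== SOURCE B (Python) =====
-- def _normalize_kernel_sizes(num_bands, kernel_sizes):
--     if num_bands <= 0:
--         raise ValueError("num_bands 必须 > 0")
--     if len(kernel_sizes) == 0: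
--         raise ValueError("kernel_sizes 不能为空")
--
--     raw = [int(k) for k in kernel_sizes]
--     for k in raw:
--         if k <= 1 or k % 2 == 0:
--             raise ValueError(f"kernel_size 必须是大于 1 的奇数，当前 {k}")
--
--     reps = -(-num_bands // len(raw))  # ceiling division: whole copies needed
--     return tuple((raw * reps)[:num_bands])
-- ===== Notes on version B (the rewrite author's own statement) =====
-- stated objective: simpler
-- what changed: The element-by-element while loop with a modular index is replaced by computing the needed repeat count up front with ceiling division, replicating the list wholesale and truncating.
import Mathlib
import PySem

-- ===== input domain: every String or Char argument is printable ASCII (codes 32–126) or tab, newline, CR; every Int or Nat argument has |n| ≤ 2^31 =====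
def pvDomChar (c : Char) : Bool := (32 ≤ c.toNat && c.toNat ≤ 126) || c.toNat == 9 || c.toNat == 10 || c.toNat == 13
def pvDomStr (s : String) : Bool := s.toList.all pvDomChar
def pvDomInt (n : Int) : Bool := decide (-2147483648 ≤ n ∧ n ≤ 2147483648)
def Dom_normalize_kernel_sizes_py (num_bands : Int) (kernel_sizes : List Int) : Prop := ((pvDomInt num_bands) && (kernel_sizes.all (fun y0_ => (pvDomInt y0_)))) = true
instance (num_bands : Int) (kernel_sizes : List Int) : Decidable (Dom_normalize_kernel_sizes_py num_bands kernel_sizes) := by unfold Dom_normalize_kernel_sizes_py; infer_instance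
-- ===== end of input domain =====

-- B replaces A's element-by-element while loop (modular index) by an up-front
-- ceiling-division repeat count, wholesale replication and a truncation (objective: simpler).


-- ===== PORT A =====
-- the while loop: `while len(out) < num_bands: out.append(raw[idx % len(raw)]); idx += 1`
-- (Pre_ guarantees raw ≠ [], so idx % raw.length is always in range; getD is exact there)
def pvLoopA (raw : List Int) (n : Nat) (out : List Int) (idx : Nat) : List Int :=
  if out.length < n then
    pvLoopA raw n (out ++ [raw.getD (idx % raw.length) 0]) (idx + 1)
  else out
termination_by n - out.length
decreasing_by simp; omega

def normalize_kernel_sizes_py (num_bands : Int) (kernel_sizes : List Int) : List Int :=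
  if num_bands ≤ 0 then []          -- raise ValueError (excluded by Pre_)
  else if kernel_sizes.length = 0 then []   -- raise ValueError (excluded by Pre_)
  else
    let raw := kernel_sizes.map (fun k => k)   -- int(k) on an int is the identity
    if raw.any (fun k => k ≤ 1 || k % 2 == 0) then []   -- raise ValueError (excluded by Pre_)
    else (pvLoopA raw num_bands.toNat [] 0).take num_bands.toNat

-- ===== PORT B =====
def normalize_kernel_sizes_py_alt (num_bands : Int) (kernel_sizes : List Int) : List Int :=
  if num_bands ≤ 0 then []          -- raise ValueError (excluded by Pre_)
  else if kernel_sizes.length = 0 then []   -- raise ValueError (excluded by Pre_)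
  else
    let raw := kernel_sizes.map (fun k => k)   -- int(k) on an int is the identity
    if raw.any (fun k => k ≤ 1 || k % 2 == 0) then []   -- raise ValueError (excluded by Pre_)
    else
      let reps := -(PySem.Int.floordiv (-num_bands) raw.length)   -- ceiling division
      ((List.replicate reps.toNat raw).flatten).take num_bands.toNat

-- ===== PRECONDITION & SPEC =====
-- Pre_ excludes exactly the inputs where A raises ValueError: num_bands ≤ 0,
-- an empty kernel list, or a kernel that is ≤ 1 or even.
def Pre_normalize_kernel_sizes_py (num_bands : Int) (kernel_sizes : List Int) : Prop :=
  0 < num_bands ∧ kernel_sizes ≠ [] ∧ ∀ k ∈ kernel_sizes, 1 < k ∧ k % 2 = 1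
instance (num_bands : Int) (kernel_sizes : List Int) : Decidable (Pre_normalize_kernel_sizes_py num_bands kernel_sizes) := by unfold Pre_normalize_kernel_sizes_py; infer_instance

def pvWitness_normalize_kernel_sizes_py : Int × List Int := (5, [3, 5])

def Spec_normalize_kernel_sizes_py (num_bands : Int) (kernel_sizes : List Int) (out : List Int) : Prop := out = normalize_kernel_sizes_py_alt num_bands kernel_sizes
instance (num_bands : Int) (kernel_sizes : List Int) (out : List Int) : Decidable (Spec_normalize_kernel_sizes_py num_bands kernel_sizes out) := by unfold Spec_normalize_kernel_sizes_py; infer_instance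

-- ===== CLAIM (what is proved, stated in full; the proofs are below) =====
def Claim_equal_normalize_kernel_sizes_py : Prop := ∀ (num_bands : Int) (kernel_sizes : List Int), Dom_normalize_kernel_sizes_py num_bands kernel_sizes → Pre_normalize_kernel_sizes_py num_bands kernel_sizes → Spec_normalize_kernel_sizes_py num_bands kernel_sizes (normalize_kernel_sizes_py num_bands kernel_sizes)

-- ===== LEMMAS AND PROOFS =====

/-- The cyclic prefix both programs compute. -/
def pvCyc (raw : List Int) (n : Nat) : List Int :=
  (List.range n).map (fun i => raw.getD (i % raw.length) 0)

theorem pvCyc_length (raw : List Int) (n : Nat) : (pvCyc raw n).length = n := by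
  simp [pvCyc]

theorem pvCyc_succ (raw : List Int) (m : Nat) :
    pvCyc raw (m + 1) = pvCyc raw m ++ [raw.getD (m % raw.length) 0] := by
  simp [pvCyc, List.range_succ]

theorem pvLoopA_cyc (raw : List Int) (n m : Nat) (h : m ≤ n) :
    pvLoopA raw n (pvCyc raw m) m = pvCyc raw n := by
  induction hk : n - m generalizing m with
  | zero =>
    have : ¬ (pvCyc raw m).length < n := by simp [pvCyc_length]; omega
    rw [pvLoopA, if_neg this]
    have : m = n := by omega
    rw [this]
  | succ k ih =>
    have hlt : (pvCyc raw m).length < n := by simp [pvCyc_length]; omega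
    rw [pvLoopA, if_pos hlt, ← pvCyc_succ]
    exact ih (m + 1) (by omega) (by omega)

theorem pvFlatten_replicate_take (raw : List Int) (hraw : raw ≠ []) (r n : Nat)
    (h : n ≤ r * raw.length) :
    ((List.replicate r raw).flatten).take n = pvCyc raw n := by
  induction r generalizing n with
  | zero =>
    have : n = 0 := by omega
    simp [this, pvCyc]
  | succ r ih =>
    have hlen : 0 < raw.length := List.length_pos_of_ne_nil hraw
    rw [List.replicate_succ, List.flatten_cons, List.take_append]
    by_cases hn : n ≤ raw.length
    · have h1 : n - raw.length = 0 := by omega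
      rw [h1]
      simp only [List.take_zero, List.append_nil]
      apply List.ext_getElem
      · simp [pvCyc_length]; omega
      · intro i h1 h2
        have hi : i < raw.length := by simp at h1; omega
        simp [pvCyc, Nat.mod_eq_of_lt hi, List.getD_eq_getElem?_getD, List.getElem?_eq_getElem hi]
    · rw [Nat.not_le] at hn
      have h' : (r + 1) * raw.length = r * raw.length + raw.length := by ring
      rw [List.take_of_length_le (by omega), ih (n - raw.length) (by omega)]
      apply List.ext_getElem
      · simp [pvCyc_length]; omega
      · intro i h1 h2
        simp only [pvCyc, List.getElem_map, List.getElem_range]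
        rcases Nat.lt_or_ge i raw.length with hi | hi
        · rw [List.getElem_append_left (by omega)]
          simp [Nat.mod_eq_of_lt hi, List.getD_eq_getElem?_getD, List.getElem?_eq_getElem hi]
        · rw [List.getElem_append_right (by omega)]
          simp only [List.getElem_map, List.getElem_range]
          congr 1
          conv_rhs => rw [show i = (i - raw.length) + raw.length by omega]
          rw [Nat.add_mod_right]

-- ===== VERDICT (by name: the statement is the Claim_ definition above) =====
theorem normalize_kernel_sizes_py_spec : Claim_equal_normalize_kernel_sizes_py := by
  intro num_bands kernel_sizes _ hpre
  obtain ⟨hn, hne, hk⟩ := hpre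
  unfold Spec_normalize_kernel_sizes_py normalize_kernel_sizes_py normalize_kernel_sizes_py_alt
  have h1 : ¬ num_bands ≤ 0 := by omega
  have h2 : ¬ kernel_sizes.length = 0 := by simp [hne]
  rw [if_neg h1, if_neg h2, if_neg h1, if_neg h2]
  simp only [List.map_id']
  have h3 : ¬ kernel_sizes.any (fun k => k ≤ 1 || k % 2 == 0) = true := by
    simp only [List.any_eq_true, not_exists]
    intro k
    rintro ⟨hkm, hbad⟩
    obtain ⟨hgt, hodd⟩ := hk k hkm
    simp only [Bool.or_eq_true, decide_eq_true_eq, beq_iff_eq] at hbad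
    omega
  rw [if_neg h3, if_neg h3]
  have hlen : 0 < kernel_sizes.length := List.length_pos_of_ne_nil hne
  -- A side
  have hA : pvLoopA kernel_sizes num_bands.toNat [] 0 = pvCyc kernel_sizes num_bands.toNat := by
    have := pvLoopA_cyc kernel_sizes num_bands.toNat 0 (by omega)
    simpa [pvCyc] using this
  rw [hA, List.take_of_length_le (by simp [pvCyc_length])]
  -- B side: the ceiling-division repeat count covers num_bands
  set reps := -(PySem.Int.floordiv (-num_bands) (kernel_sizes.length : Int)) with hreps
  have hceil : num_bands ≤ reps * kernel_sizes.length := by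
    have := (PySem.Int.neg_floordiv_neg_eq_iff_of_pos (a := num_bands)
      (b := (kernel_sizes.length : Int)) (q := reps) (by exact_mod_cast hlen)).mp rfl
    exact this.2
  have hcov : num_bands.toNat ≤ reps.toNat * kernel_sizes.length := by
    have hr : 0 ≤ reps := by nlinarith [hceil, hn, Int.natCast_pos.mpr hlen]
    have : (num_bands.toNat : Int) ≤ (reps.toNat : Int) * (kernel_sizes.length : Int) := by
      rw [Int.toNat_of_nonneg hr, Int.toNat_of_nonneg (by omega)]; exact hceil
    exact_mod_cast this
  rw [pvFlatten_replicate_take kernel_sizes hne reps.toNat num_bands.toNat hcov]
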